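-- pv_equiv track=rewrite | github.com/kevinren1108/leetcode | 279. Perfect Squares/1.py | dfs
-- ===== SOURCE A (Python) =====
-- def dfs(n, i, c, r):
--     if n == 0:
--         r += [c]
--         return r
--
--     elif n < 0 or i * i > n:
--         return
--
--     dfs(n - i * i, i + 1, c + [i * i], r)
--     dfs(n - i * i, i, c + [i * i], r)
--
--     return r
-- ===== SOURCE B (Python) =====
-- def dfs(n, i, c, r):
--     if n != 0 and (n < 0 or i * i > n):
--         return None
--     stack = [(n, i, c)]
--     while stack:
--         m, j, cc = stack.pop()
--         if m == 0:
--             r.append(cc)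
--         elif m < 0 or j * j > m:
--             continue
--         else:
--             stack.append((m - j * j, j, cc + [j * j]))
--             stack.append((m - j * j, j + 1, cc + [j * j]))
--     return r
-- ===== Notes on version B (the rewrite author's own statement) =====
-- stated objective: alternative
-- what changed: Replaced the double self-recursion with an iterative DFS over an explicit worklist stack of (n, i, c) states, pushing children in reverse so popping reproduces A's pre-order exactly.
-- outside the precondition, e.g. on dfs(5, -2, [], []): A returns [[4, 1], [4, 1]], B returns [[4, 1], [4, 1]]
import Mathlib
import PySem

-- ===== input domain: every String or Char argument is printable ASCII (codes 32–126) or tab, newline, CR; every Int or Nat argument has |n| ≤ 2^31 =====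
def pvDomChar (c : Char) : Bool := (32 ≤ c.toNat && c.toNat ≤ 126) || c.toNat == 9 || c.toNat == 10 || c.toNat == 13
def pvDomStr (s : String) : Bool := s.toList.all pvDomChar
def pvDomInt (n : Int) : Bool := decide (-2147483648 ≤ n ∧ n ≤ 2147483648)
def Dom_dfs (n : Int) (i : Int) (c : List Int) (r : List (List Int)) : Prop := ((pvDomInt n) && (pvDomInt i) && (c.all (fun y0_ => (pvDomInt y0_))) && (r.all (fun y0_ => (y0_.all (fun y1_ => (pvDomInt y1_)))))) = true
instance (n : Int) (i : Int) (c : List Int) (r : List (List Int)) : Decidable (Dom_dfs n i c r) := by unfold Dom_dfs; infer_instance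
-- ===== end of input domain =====

-- B replaces A's double self-recursion by an iterative DFS over an explicit worklist stack
-- (same pre-order, same duplicates); equivalence is about the RETURN value — both Pythons
-- mutate r in place identically.

-- ===== PORT A =====
-- Fuel makes the recursion total in Lean (it only guards totality; inside Pre_ the fuel
-- n.toNat + 1 is always sufficient, proved below).  A's recursive calls are executed for
-- their mutation of r: a call returns some r' (the mutated r) except in the prune branch,
-- where it returns none and r is untouched — hence `.getD r` reads back the threaded r.
def dfsCore : Nat → Int → Int → List Int → List (List Int) → Option (List (List Int))
  | 0, _, _, _, _ => none
  | fuel + 1, n, i, c, r =>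
    if n = 0 then some (r ++ [c])
    else if n < 0 ∨ i * i > n then none
    else
      let r1 := (dfsCore fuel (n - i * i) (i + 1) (c ++ [i * i]) r).getD r
      let r2 := (dfsCore fuel (n - i * i) i (c ++ [i * i]) r1).getD r1
      some r2

def dfs (n : Int) (i : Int) (c : List Int) (r : List (List Int)) : Option (List (List Int)) :=
  dfsCore (n.toNat + 1) n i c r

-- ===== PORT B =====
-- Source B's while-loop over the stack; the head of the list is the top of the stack, so the
-- two pushes of Source B appear here in reverse (popped) order.  Fuel bounds the number of
-- loop iterations (2^(n.toNat+1) steps suffice inside Pre_, proved below).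
def stepB : Nat → List (Int × Int × List Int) → List (List Int) → List (List Int)
  | 0, _, r => r
  | _ + 1, [], r => r
  | fuel + 1, (m, j, cc) :: st, r =>
    if m = 0 then stepB fuel st (r ++ [cc])
    else if m < 0 ∨ j * j > m then stepB fuel st r
    else stepB fuel ((m - j * j, j + 1, cc ++ [j * j]) :: (m - j * j, j, cc ++ [j * j]) :: st) r

def dfs_alt (n : Int) (i : Int) (c : List Int) (r : List (List Int)) : Option (List (List Int)) :=
  if n ≠ 0 ∧ (n < 0 ∨ i * i > n) then none
  else some (stepB (2 ^ (n.toNat + 1)) [(n, i, c)] r)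

-- ===== PRECONDITION & SPEC =====
-- Pre_ excludes i ≤ 0 with 0 < n and i*i ≤ n: there A almost always recurses forever
-- (any state (m, 0) with m > 0 repeats itself); the sporadic terminating negative-i calls
-- are excluded with it because their termination has no closed form — on those A and B agree.
def Pre_dfs (n : Int) (i : Int) (c : List Int) (r : List (List Int)) : Prop :=
  1 ≤ i ∨ n = 0 ∨ n < 0 ∨ i * i > n
instance (n : Int) (i : Int) (c : List Int) (r : List (List Int)) : Decidable (Pre_dfs n i c r) := by unfold Pre_dfs; infer_instance

def pvWitness_dfs : Int × Int × List Int × List (List Int) := (12, 1, [], [])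

def Spec_dfs (n : Int) (i : Int) (c : List Int) (r : List (List Int)) (out : Option (List (List Int))) : Prop := out = dfs_alt n i c r
instance (n : Int) (i : Int) (c : List Int) (r : List (List Int)) (out : Option (List (List Int))) : Decidable (Spec_dfs n i c r out) := by unfold Spec_dfs; infer_instance

-- ===== CLAIM (what is proved, stated in full; the proofs are below) =====
def Claim_equal_dfs : Prop := ∀ (n : Int) (i : Int) (c : List Int) (r : List (List Int)), Dom_dfs n i c r → Pre_dfs n i c r → Spec_dfs n i c r (dfs n i c r)

-- ===== LEMMAS AND PROOFS =====

-- The common functional specification: the list r after a (terminating) call.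
def run (n i : Int) (c : List Int) (r : List (List Int)) : List (List Int) :=
  if n = 0 then r ++ [c]
  else if n < 0 ∨ i ≤ 0 ∨ i * i > n then r
  else run (n - i * i) i (c ++ [i * i]) (run (n - i * i) (i + 1) (c ++ [i * i]) r)
termination_by n.toNat
decreasing_by
  all_goals
    rename_i h0 h1
    push_neg at h1
    obtain ⟨hn, hi, hii⟩ := h1
    have h2 : 1 ≤ i * i := by nlinarith
    zify
    omega

-- Number of stack-machine steps to fully process one state.
def T (n i : Int) : Nat :=
  if n = 0 then 1
  else if n < 0 ∨ i ≤ 0 ∨ i * i > n then 1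
  else 1 + T (n - i * i) (i + 1) + T (n - i * i) i
termination_by n.toNat
decreasing_by
  all_goals
    rename_i h0 h1
    push_neg at h1
    obtain ⟨hn, hi, hii⟩ := h1
    have h2 : 1 ≤ i * i := by nlinarith
    zify
    omega

lemma run_zero (n i : Int) (c : List Int) (r : List (List Int)) (h : n = 0) :
    run n i c r = r ++ [c] := by rw [run, if_pos h]

lemma run_stop (n i : Int) (c : List Int) (r : List (List Int)) (h0 : n ≠ 0)
    (h : n < 0 ∨ i ≤ 0 ∨ i * i > n) : run n i c r = r := by
  rw [run, if_neg h0, if_pos h]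

lemma run_step (n i : Int) (c : List Int) (r : List (List Int)) (h0 : n ≠ 0)
    (h : ¬(n < 0 ∨ i ≤ 0 ∨ i * i > n)) :
    run n i c r = run (n - i * i) i (c ++ [i * i]) (run (n - i * i) (i + 1) (c ++ [i * i]) r) := by
  rw [run, if_neg h0, if_neg h]

lemma T_zero (n i : Int) (h : n = 0) : T n i = 1 := by rw [T, if_pos h]

lemma T_stop (n i : Int) (h0 : n ≠ 0) (h : n < 0 ∨ i ≤ 0 ∨ i * i > n) : T n i = 1 := by
  rw [T, if_neg h0, if_pos h]

lemma T_step (n i : Int) (h0 : n ≠ 0) (h : ¬(n < 0 ∨ i ≤ 0 ∨ i * i > n)) :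
    T n i = 1 + T (n - i * i) (i + 1) + T (n - i * i) i := by
  rw [T, if_neg h0, if_neg h]

lemma stepB_nil (f : Nat) (r : List (List Int)) : stepB f [] r = r := by
  cases f <;> simp [stepB]

lemma T_bound (N : Nat) (n i : Int) (hN : n.toNat ≤ N) : T n i ≤ 2 ^ (n.toNat + 1) - 1 := by
  induction N generalizing n i with
  | zero =>
    have hpos : 0 < 2 ^ n.toNat := Nat.two_pow_pos n.toNat
    by_cases h0 : n = 0
    · rw [T_zero n i h0]; omega
    · rw [T_stop n i h0 (by omega)]; omega
  | succ N ih =>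
    have hpos : 0 < 2 ^ n.toNat := Nat.two_pow_pos n.toNat
    by_cases h0 : n = 0
    · rw [T_zero n i h0]; omega
    · by_cases h1 : n < 0 ∨ i ≤ 0 ∨ i * i > n
      · rw [T_stop n i h0 h1]; omega
      · rw [T_step n i h0 h1]
        push_neg at h1
        obtain ⟨hn, hi, hii⟩ := h1
        have h2 : 1 ≤ i * i := by nlinarith
        have hlt : (n - i * i).toNat < n.toNat := by omega
        have b1 := ih (n - i * i) (i + 1) (by omega)
        have b2 := ih (n - i * i) i (by omega)
        have hp : 2 ^ ((n - i * i).toNat + 1) * 2 ≤ 2 ^ (n.toNat + 1) := by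
          rw [← pow_succ]
          exact Nat.pow_le_pow_right (by norm_num) (by omega)
        have hq1 : 0 < 2 ^ ((n - i * i).toNat + 1) := Nat.two_pow_pos _
        omega

-- A pruned/zero/recursive child's returned Option, `.getD r`-read back, is exactly `run`.
lemma child_getD (m j : Int) (cc : List Int) (r : List (List Int)) (hj : 1 ≤ j) :
    ((if m = 0 then some (r ++ [cc]) else if m < 0 ∨ j * j > m then none
      else some (run m j cc r)) : Option (List (List Int))).getD r = run m j cc r := by
  by_cases hz : m = 0
  · rw [if_pos hz, run_zero m j cc r hz]; rfl
  · rw [if_neg hz]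
    by_cases hq : m < 0 ∨ j * j > m
    · rw [if_pos hq, run_stop m j cc r hz (by rcases hq with h | h; exact Or.inl h; exact Or.inr (Or.inr h))]
      rfl
    · rw [if_neg hq]; rfl

-- A's fuel-based recursion computes `run` once the fuel exceeds n.toNat (for i ≥ 1).
lemma dfsCore_run (N : Nat) (n i : Int) (hN : n.toNat ≤ N) (hi : 1 ≤ i)
    (c : List Int) (r : List (List Int)) (f : Nat) (hf : n.toNat < f) :
    dfsCore f n i c r =
      if n = 0 then some (r ++ [c])
      else if n < 0 ∨ i * i > n then none
      else some (run n i c r) := by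
  induction N generalizing n i c r f with
  | zero =>
    obtain ⟨f', rfl⟩ : ∃ f', f = f' + 1 := ⟨f - 1, by omega⟩
    by_cases h0 : n = 0
    · simp [dfsCore, h0]
    · have hneg : n < 0 := by omega
      simp [dfsCore, h0, hneg]
  | succ N ih =>
    obtain ⟨f', rfl⟩ : ∃ f', f = f' + 1 := ⟨f - 1, by omega⟩
    by_cases h0 : n = 0
    · simp [dfsCore, h0]
    · by_cases hp : n < 0 ∨ i * i > n
      · simp [dfsCore, h0, hp]
      · push_neg at hp
        obtain ⟨hn, hii⟩ := hp
        have h2 : 1 ≤ i * i := by nlinarith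
        have hlt : (n - i * i).toNat < n.toNat := by omega
        have c1 := ih (n - i * i) (i + 1) (by omega) (by omega) (c ++ [i * i]) r f' (by omega)
        have hrun1 : (dfsCore f' (n - i * i) (i + 1) (c ++ [i * i]) r).getD r
            = run (n - i * i) (i + 1) (c ++ [i * i]) r := by
          rw [c1]; exact child_getD _ _ _ _ (by omega)
        have c2 := ih (n - i * i) i (by omega) hi (c ++ [i * i])
          (run (n - i * i) (i + 1) (c ++ [i * i]) r) f' (by omega)
        have hrun2 : (dfsCore f' (n - i * i) i (c ++ [i * i]) (run (n - i * i) (i + 1) (c ++ [i * i]) r)).getD (run (n - i * i) (i + 1) (c ++ [i * i]) r)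
            = run (n - i * i) i (c ++ [i * i]) (run (n - i * i) (i + 1) (c ++ [i * i]) r) := by
          rw [c2]; exact child_getD _ _ _ _ hi
        have hps : ¬(n < 0 ∨ i * i > n) := by push_neg; exact ⟨hn, hii⟩
        rw [if_neg h0, if_neg hps]
        simp only [dfsCore, if_neg h0, if_neg hps]
        rw [hrun1, hrun2, run_step n i c r h0 (by push_neg; exact ⟨hn, by omega, hii⟩)]

-- B's stack machine, given T n i steps for the top state, consumes it and applies `run` to r.
lemma stepB_run (N : Nat) (n i : Int) (hN : n.toNat ≤ N) (hi : 1 ≤ i)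
    (c : List Int) (st : List (Int × Int × List Int)) (r : List (List Int)) (f2 : Nat) :
    stepB (T n i + f2) ((n, i, c) :: st) r = stepB f2 st (run n i c r) := by
  induction N generalizing n i c st r f2 with
  | zero =>
    by_cases h0 : n = 0
    · rw [T_zero n i h0, Nat.add_comm, run_zero n i c r h0]
      simp [stepB, h0]
    · have hneg : n < 0 := by omega
      rw [T_stop n i h0 (by omega), Nat.add_comm, run_stop n i c r h0 (by omega)]
      simp [stepB, h0, hneg]
  | succ N ih =>
    by_cases h0 : n = 0
    · rw [T_zero n i h0, Nat.add_comm, run_zero n i c r h0]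
      simp [stepB, h0]
    · by_cases hp : n < 0 ∨ i * i > n
      · rw [T_stop n i h0 (by rcases hp with h | h; exact Or.inl h; exact Or.inr (Or.inr h)),
          Nat.add_comm, run_stop n i c r h0 (by rcases hp with h | h; exact Or.inl h; exact Or.inr (Or.inr h))]
        rcases hp with hp | hp
        · simp [stepB, h0, hp]
        · simp [stepB, h0, hp]
      · push_neg at hp
        obtain ⟨hn, hii⟩ := hp
        have h2 : 1 ≤ i * i := by nlinarith
        have hlt : (n - i * i).toNat < n.toNat := by omega
        have hT := T_step n i h0 (by push_neg; exact ⟨hn, by omega, hii⟩)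
        have harith : T n i + f2 = (T (n - i * i) (i + 1) + (T (n - i * i) i + f2)) + 1 := by
          rw [hT]; omega
        rw [harith]
        have hps : ¬(n < 0 ∨ i * i > n) := by push_neg; exact ⟨hn, hii⟩
        rw [show stepB ((T (n - i * i) (i + 1) + (T (n - i * i) i + f2)) + 1) ((n, i, c) :: st) r
            = stepB (T (n - i * i) (i + 1) + (T (n - i * i) i + f2))
                ((n - i * i, i + 1, c ++ [i * i]) :: (n - i * i, i, c ++ [i * i]) :: st) r
          from by rw [stepB, if_neg h0, if_neg hps]]
        rw [ih (n - i * i) (i + 1) (by omega) (by omega) (c ++ [i * i]) _ r _]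
        rw [ih (n - i * i) i (by omega) hi (c ++ [i * i]) st _ f2]
        rw [run_step n i c r h0 (by push_neg; exact ⟨hn, by omega, hii⟩)]

-- ===== VERDICT (by name: the statement is the Claim_ definition above) =====
theorem dfs_spec : Claim_equal_dfs := by
  intro n i c r _hDom hPre
  unfold Spec_dfs dfs dfs_alt
  by_cases h0 : n = 0
  · subst h0
    simp [dfsCore, stepB, pow_succ]
  · by_cases hp : n < 0 ∨ i * i > n
    · rw [if_pos ⟨h0, hp⟩]
      show dfsCore (n.toNat + 1) n i c r = none
      rcases hp with hp | hp
      · simp [dfsCore, h0, hp]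
      · simp [dfsCore, h0, hp]
    · push_neg at hp
      obtain ⟨hn, hii⟩ := hp
      have hi : 1 ≤ i := by
        rcases hPre with h | h | h | h
        · exact h
        · omega
        · omega
        · omega
      rw [if_neg (by push_neg; intro _; exact ⟨hn, hii⟩)]
      rw [dfsCore_run n.toNat n i le_rfl hi c r (n.toNat + 1) (by omega)]
      rw [if_neg h0, if_neg (by push_neg; exact ⟨hn, hii⟩)]
      have hTb : T n i ≤ 2 ^ (n.toNat + 1) - 1 := T_bound n.toNat n i le_rfl
      have hsplit : 2 ^ (n.toNat + 1) = T n i + (2 ^ (n.toNat + 1) - T n i) := by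
        have : 0 < 2 ^ (n.toNat + 1) := Nat.two_pow_pos _
        omega
      rw [hsplit, stepB_run n.toNat n i le_rfl hi c [] r _, stepB_nil]
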